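-- pv_equiv track=rewrite | github.com/ChopinWeb/ChopinWeb.github.io | MeanDensity.py | LeftNonNote
-- ===== SOURCE A (Python) =====
-- def StrExist(_str1_, _str2_): #_str1_に_str2_が存在するかどうかのBoolean
--     if type(_str2_) is str:
--         return _str1_.find(_str2_) != -1
--     else:
--         for s in _str2_:
--             if _str1_.find(s) != -1:
--                 return True
--         return False
--
-- def LeftNonNote(_str_): #左端に連続するノーツでない数を数える
--     list = []
--     for i in range(1,5):
--         if StrExist(_str_, str(i)):
--             ExistIndex = _str_.find(str(i))
--             SplitStr = _str_[:ExistIndex+1]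
--             list.append(ExistIndex - SplitStr.count(" "))
--     if list != []:
--         return min(list)
--     else:
--         return -1
-- ===== SOURCE B (Python) =====
-- def LeftNonNote(_str_):  # count of non-space chars before the earliest note digit ('1'-'4'); -1 if none
--     count = 0
--     for ch in _str_:
--         if ch == ' ':
--             continue
--         if ch in '1234':
--             return count
--         count += 1
--     return -1
-- ===== Notes on version B (the rewrite author's own statement) =====
-- stated objective: simpler
-- what changed: Replaced the per-digit find/slice/count passes plus a final min() with a single left-to-right scan that keeps a running non-space counter and returns it at the first note digit.
import Mathlib
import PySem

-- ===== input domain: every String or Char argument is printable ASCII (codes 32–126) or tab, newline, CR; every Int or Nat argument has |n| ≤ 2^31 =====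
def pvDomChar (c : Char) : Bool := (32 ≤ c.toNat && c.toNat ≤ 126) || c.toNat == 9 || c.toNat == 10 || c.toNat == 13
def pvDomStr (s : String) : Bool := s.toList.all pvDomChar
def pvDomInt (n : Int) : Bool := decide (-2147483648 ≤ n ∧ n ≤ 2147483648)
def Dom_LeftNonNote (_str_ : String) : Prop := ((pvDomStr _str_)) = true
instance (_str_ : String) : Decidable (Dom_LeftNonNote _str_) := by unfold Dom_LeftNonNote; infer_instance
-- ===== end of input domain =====

-- B replaces the per-digit find/slice/count passes and final min() with one left-to-right
-- scan keeping a running non-space counter (objective: simpler).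


-- ===== PORT A =====
-- StrExist is always called with a str second argument here, so only the str branch is live.
def StrExist (_str1_ _str2_ : String) : Bool := PySem.Str.find _str1_ _str2_ != -1

def LeftNonNote (_str_ : String) : Int :=
  let lst : List Int := (PySem.List.pyRange 1 5 1).foldl (fun acc i =>
    if StrExist _str_ (PySem.Int.toStr i) then
      let existIndex := PySem.Str.find _str_ (PySem.Int.toStr i)
      let splitStr := PySem.Str.slice _str_ none (some (existIndex + 1))
      acc ++ [existIndex - ((PySem.Str.count splitStr " " : Nat) : Int)]
    else acc) []
  if lst ≠ [] then (PySem.List.min? lst (fun x => x)).getD (-1) else -1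

-- ===== PORT B =====
def altLoop : List Char → Int → Int
  | [], _ => -1
  | c :: rest, cnt =>
    if c = ' ' then altLoop rest cnt
    else if c ∈ (['1', '2', '3', '4'] : List Char) then cnt
    else altLoop rest (cnt + 1)

def LeftNonNote_alt (_str_ : String) : Int := altLoop _str_.toList 0

-- ===== PRECONDITION & SPEC =====
def Spec_LeftNonNote (_str_ : String) (out : Int) : Prop := out = LeftNonNote_alt _str_
instance (_str_ : String) (out : Int) : Decidable (Spec_LeftNonNote _str_ out) := by unfold Spec_LeftNonNote; infer_instance

-- ===== CLAIM (what is proved, stated in full; the proofs are below) =====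
def Claim_equal_LeftNonNote : Prop := ∀ (_str_ : String), Dom_LeftNonNote _str_ → Spec_LeftNonNote _str_ (LeftNonNote _str_)

-- ===== LEMMAS AND PROOFS =====

-- the note predicate, as B tests it
def isNote (c : Char) : Bool := decide (c ∈ (['1', '2', '3', '4'] : List Char))

-- number of non-space characters among the first j characters
def nsb (cs : List Char) (j : Nat) : Int := ((cs.take j).countP (fun x => !(x == ' ')) : Int)

-- the list entry A's loop appends for digit d (as a 0/1-element list)
def ent (cs : List Char) (d : Char) : List Int :=
  if d ∈ cs then [((cs.findIdx (· == d) : Nat) : Int) - (((cs.take (cs.findIdx (· == d) + 1)).count ' ' : Nat) : Int)] else []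

lemma findIdx_le_of_getElem (q : Char → Bool) : ∀ (cs : List Char) (i : Nat) (h : i < cs.length),
    q cs[i] = true → cs.findIdx q ≤ i := by
  intro cs
  induction cs with
  | nil => intro i h; simp at h
  | cons c t ih =>
    intro i h hq
    by_cases hc : q c = true
    · simp [List.findIdx_cons, hc]
    · cases i with
      | zero => exact absurd (by simpa using hq) hc
      | succ i' =>
        have hc' : q c = false := by
          cases hqc : q c with
          | false => rfl
          | true => exact absurd hqc hc
        rw [List.findIdx_cons, hc']
        simp only [Bool.cond_false]
        have := ih i' (by simpa using h) (by simpa using hq)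
        omega

lemma find_go_single (d : Char) : ∀ (cs : List Char) (k : Nat),
    PySem.Chars.find.go [d] cs k = if d ∈ cs then (((k + cs.findIdx (· == d) : Nat)) : Int) else -1 := by
  intro cs
  induction cs with
  | nil => intro k; simp [PySem.Chars.find.go]
  | cons c t ih =>
    intro k
    by_cases hc : d = c
    · subst hc
      simp [PySem.Chars.find.go, List.isPrefixOf, List.findIdx_cons]
    · have hpre : [d].isPrefixOf (c :: t) = false := by
        simp [List.isPrefixOf]
        intro h
        first | exact hc h | exact hc h.symm
      have : PySem.Chars.find.go [d] (c :: t) k = PySem.Chars.find.go [d] t (k + 1) := by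
        conv_lhs => rw [PySem.Chars.find.go]
        simp [hpre]
      rw [this, ih (k + 1)]
      have hcd : (c == d) = false := beq_eq_false_iff_ne.mpr (Ne.symm hc)
      have hfidx : (c :: t).findIdx (· == d) = t.findIdx (· == d) + 1 := by
        rw [List.findIdx_cons, hcd]; rfl
      by_cases hm : d ∈ t
      · have hmem2 : d ∈ c :: t := List.mem_cons_of_mem _ hm
        rw [if_pos hm, if_pos hmem2, hfidx]
        push_cast; ring
      · have hmem2 : d ∉ c :: t := by simp [hc, hm]
        rw [if_neg hm, if_neg hmem2]

lemma find_single (cs : List Char) (d : Char) :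
    PySem.Chars.find cs [d] = if d ∈ cs then ((cs.findIdx (· == d) : Nat) : Int) else -1 := by
  have := find_go_single d cs 0
  simpa [PySem.Chars.find] using this

lemma count_go_single (c : Char) : ∀ (cs : List Char) (fuel acc : Nat), cs.length ≤ fuel →
    PySem.Chars.count.go [c] fuel cs acc = acc + cs.count c := by
  intro cs
  induction cs with
  | nil => intro fuel acc _; cases fuel <;> simp [PySem.Chars.count.go]
  | cons h t ih =>
    intro fuel acc hf
    cases fuel with
    | zero => simp at hf
    | succ f =>
      have ht : t.length ≤ f := by simpa using hf
      by_cases hch : c = h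
      · subst hch
        have hpre : [c].isPrefixOf (c :: t) = true := by simp [List.isPrefixOf]
        conv_lhs => rw [PySem.Chars.count.go]
        simp only [hpre, if_pos, List.length_singleton, List.drop_succ_cons, List.drop_zero]
        rw [ih f (acc + 1) ht]
        simp [List.count_cons]; omega
      · have hpre : [c].isPrefixOf (h :: t) = false := by
          simp [List.isPrefixOf]
          intro hx
          first | exact hch hx | exact hch hx.symm
        conv_lhs => rw [PySem.Chars.count.go]
        simp only [hpre, Bool.false_eq_true, if_false]
        rw [ih f acc ht]
        simp [List.count_cons, Ne.symm hch]
  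
lemma count_single (cs : List Char) (c : Char) :
    PySem.Chars.count cs [c] = cs.count c := by
  unfold PySem.Chars.count
  simp only [List.isEmpty_cons, Bool.false_eq_true, if_false]
  simpa using count_go_single c cs cs.length 0 le_rfl

lemma nsb_mono (cs : List Char) {i j : Nat} (h : i ≤ j) : nsb cs i ≤ nsb cs j := by
  unfold nsb
  have hsub : (cs.take i).Sublist (cs.take j) := by
    have : cs.take i = (cs.take j).take i := by rw [List.take_take, Nat.min_eq_left h]
    rw [this]
    exact (List.take_prefix i (cs.take j)).sublist
  exact_mod_cast hsub.countP_le

lemma value_eq_nsb (cs : List Char) (j : Nat) (h : j < cs.length) (hd : cs[j] ≠ ' ') :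
    ((j : Nat) : Int) - (((cs.take (j + 1)).count ' ' : Nat) : Int) = nsb cs j := by
  have htake : cs.take (j + 1) = cs.take j ++ [cs[j]] := by
    rw [List.take_succ, List.getElem?_eq_getElem h]; rfl
  have hcount : (cs.take (j + 1)).count ' ' = (cs.take j).count ' ' := by
    rw [htake, List.count_append]
    simp [hd]
  have hlen : (cs.take j).length = j := List.length_take_of_le (by omega)
  have hsplit : (cs.take j).length = (cs.take j).countP (fun x => x == ' ') + (cs.take j).countP (fun x => !(x == ' ')) := by
    have := List.length_eq_countP_add_countP (l := cs.take j) (fun x => x == ' ')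
    simpa [decide_not] using this
  have hc : (cs.take j).count ' ' = (cs.take j).countP (fun x => x == ' ') := by
    simp [List.count]
  unfold nsb
  rw [hcount, hc]
  omega

lemma altB_eq : ∀ (cs : List Char) (acc : Int),
    altLoop cs acc = if cs.any isNote then acc + nsb cs (cs.findIdx isNote) else -1 := by
  intro cs
  induction cs with
  | nil => intro acc; simp [altLoop, nsb]
  | cons c t ih =>
    intro acc
    by_cases hsp : c = ' '
    · subst hsp
      have hnote : isNote ' ' = false := by decide
      rw [altLoop, if_pos rfl, ih acc]
      simp only [List.any_cons, hnote, Bool.false_or, List.findIdx_cons, Bool.cond_false]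
      by_cases ha : t.any isNote = true
      · simp only [ha, if_pos]
        have : nsb (' ' :: t) (t.findIdx isNote + 1) = nsb t (t.findIdx isNote) := by
          unfold nsb; simp [List.take_succ_cons, List.countP_cons]
        rw [this]
      · simp [ha]
    · by_cases hn : c ∈ (['1', '2', '3', '4'] : List Char)
      · rw [altLoop, if_neg hsp, if_pos hn]
        have : isNote c = true := by simp [isNote, hn]
        simp [List.any_cons, this, List.findIdx_cons, nsb]
      · rw [altLoop, if_neg hsp, if_neg hn, ih (acc + 1)]
        have hnote : isNote c = false := by simp [isNote, hn]
        simp only [List.any_cons, hnote, Bool.false_or, List.findIdx_cons, Bool.cond_false]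
        by_cases ha : t.any isNote = true
        · simp only [ha, if_pos]
          have : nsb (c :: t) (t.findIdx isNote + 1) = 1 + nsb t (t.findIdx isNote) := by
            unfold nsb
            simp only [List.take_succ_cons, List.countP_cons]
            have : (!(c == ' ')) = true := by simp [hsp]
            simp [this]; push_cast; ring
          rw [this]; ring
        · simp [ha]

lemma ent_eq (cs : List Char) (d : Char) (hd : d ≠ ' ') :
    ent cs d = if d ∈ cs then [nsb cs (cs.findIdx (· == d))] else [] := by
  unfold ent
  by_cases hm : d ∈ cs
  · simp only [hm, if_pos]
    have hlt : cs.findIdx (· == d) < cs.length :=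
      List.findIdx_lt_length_of_exists ⟨d, hm, by simp⟩
    have hget : cs[cs.findIdx (· == d)] = d := by
      have := List.findIdx_getElem (p := (· == d)) (xs := cs) (w := hlt)
      simpa [beq_iff_eq] using this
    rw [value_eq_nsb cs _ hlt (by rw [hget]; exact hd)]
  · simp [hm]

lemma step_eq (s : String) (ds : String) (d : Char) (h : ds.toList = [d]) (hd : d ≠ ' ')
    (acc : List Int) :
    (if StrExist s ds then
      acc ++ [PySem.Str.find s ds - ((PySem.Str.count (PySem.Str.slice s none (some (PySem.Str.find s ds + 1))) " " : Nat) : Int)]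
    else acc) = acc ++ ent s.toList d := by
  have hfind : PySem.Str.find s ds = PySem.Chars.find s.toList [d] := by
    rw [PySem.Str.find_eq, h]
  rw [ent_eq s.toList d hd]
  by_cases hm : d ∈ s.toList
  · have hj : PySem.Str.find s ds = ((s.toList.findIdx (· == d) : Nat) : Int) := by
      rw [hfind, find_single, if_pos hm]
    have hcond : StrExist s ds = true := by
      unfold StrExist
      rw [hj]
      simp only [bne_iff_ne, ne_eq, decide_eq_true_eq]
      intro hcontra
      omega
    rw [if_pos hcond, if_pos hm]
    have hlt : s.toList.findIdx (· == d) < s.toList.length :=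
      List.findIdx_lt_length_of_exists ⟨d, hm, by simp⟩
    have hget : s.toList[s.toList.findIdx (· == d)] = d := by
      have := List.findIdx_getElem (p := (· == d)) (xs := s.toList) (w := hlt)
      simpa [beq_iff_eq] using this
    have hslice : (PySem.Str.slice s none (some (((s.toList.findIdx (· == d) : Nat) : Int) + 1))).toList
        = s.toList.take (s.toList.findIdx (· == d) + 1) := by
      rw [PySem.Str.toList_slice]
      rw [show ((s.toList.findIdx (· == d) : Nat) : Int) + 1 = (((s.toList.findIdx (· == d) + 1 : Nat)) : Int) by push_cast; ring]
      rw [PySem.Chars.slice_eq_listSlice, PySem.List.slice_to_natCast]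
    have hcnt : (PySem.Str.count (PySem.Str.slice s none (some (((s.toList.findIdx (· == d) : Nat) : Int) + 1))) " " : Nat)
        = (s.toList.take (s.toList.findIdx (· == d) + 1)).count ' ' := by
      rw [PySem.Str.count_eq, hslice]
      have hsp : (" " : String).toList = [' '] := by decide
      rw [hsp, count_single]
    rw [hj, hcnt, value_eq_nsb s.toList _ hlt (by rw [hget]; exact hd)]
  · have hneg : PySem.Str.find s ds = -1 := by rw [hfind, find_single, if_neg hm]
    have hcond : StrExist s ds = false := by
      unfold StrExist
      rw [hneg]
      simp
    rw [if_neg (by simp [hcond]), if_neg hm, List.append_nil]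

lemma mem_ents (cs : List Char) (x : Int)
    (hx : x ∈ ent cs '1' ++ ent cs '2' ++ ent cs '3' ++ ent cs '4') :
    ∃ d ∈ (['1', '2', '3', '4'] : List Char), d ∈ cs ∧ x = nsb cs (cs.findIdx (· == d)) := by
  simp only [List.mem_append] at hx
  rcases hx with ((h1 | h2) | h3) | h4
  · refine ⟨'1', by simp, ?_⟩
    rw [ent_eq cs '1' (by decide)] at h1
    by_cases hm : '1' ∈ cs
    · simp [hm] at h1; exact ⟨hm, h1⟩
    · simp [hm] at h1
  · refine ⟨'2', by simp, ?_⟩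
    rw [ent_eq cs '2' (by decide)] at h2
    by_cases hm : '2' ∈ cs
    · simp [hm] at h2; exact ⟨hm, h2⟩
    · simp [hm] at h2
  · refine ⟨'3', by simp, ?_⟩
    rw [ent_eq cs '3' (by decide)] at h3
    by_cases hm : '3' ∈ cs
    · simp [hm] at h3; exact ⟨hm, h3⟩
    · simp [hm] at h3
  · refine ⟨'4', by simp, ?_⟩
    rw [ent_eq cs '4' (by decide)] at h4
    by_cases hm : '4' ∈ cs
    · simp [hm] at h4; exact ⟨hm, h4⟩
    · simp [hm] at h4

lemma note_findIdx_ge (cs : List Char) (d : Char) (hd : isNote d = true) (hm : d ∈ cs) :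
    cs.findIdx isNote ≤ cs.findIdx (· == d) := by
  have hlt : cs.findIdx (· == d) < cs.length :=
    List.findIdx_lt_length_of_exists ⟨d, hm, by simp⟩
  have hget : cs[cs.findIdx (· == d)] = d := by
    have := List.findIdx_getElem (p := (· == d)) (xs := cs) (w := hlt)
    simpa [beq_iff_eq] using this
  exact findIdx_le_of_getElem isNote cs _ hlt (by rw [hget]; exact hd)

lemma min_ents (cs : List Char) (h : cs.any isNote = true) :
    (ent cs '1' ++ ent cs '2' ++ ent cs '3' ++ ent cs '4') ≠ [] ∧
    PySem.List.min? (ent cs '1' ++ ent cs '2' ++ ent cs '3' ++ ent cs '4') (fun x => x)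
      = some (nsb cs (cs.findIdx isNote)) := by
  set J := cs.findIdx isNote with hJ
  have hJlt : J < cs.length := by
    rcases List.any_eq_true.mp h with ⟨d, hdm, hdn⟩
    exact List.findIdx_lt_length_of_exists ⟨d, hdm, hdn⟩
  set d0 := cs[J] with hd0
  have hnote0 : isNote d0 = true := List.findIdx_getElem (w := hJlt)
  have hd0mem : d0 ∈ cs := List.getElem_mem hJlt
  have hd0digits : d0 ∈ (['1', '2', '3', '4'] : List Char) := by
    simpa [isNote] using hnote0
  have hfid : cs.findIdx (· == d0) = J := by
    have hle : cs.findIdx (· == d0) ≤ J :=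
      findIdx_le_of_getElem (· == d0) cs J hJlt (by simp [hd0])
    have hge : J ≤ cs.findIdx (· == d0) := note_findIdx_ge cs d0 hnote0 hd0mem
    omega
  have hentmem : nsb cs J ∈ ent cs '1' ++ ent cs '2' ++ ent cs '3' ++ ent cs '4' := by
    have hinent : nsb cs J ∈ ent cs d0 := by
      rw [ent_eq cs d0 (by rcases (by simpa using hd0digits : d0 = '1' ∨ d0 = '2' ∨ d0 = '3' ∨ d0 = '4') with h|h|h|h <;> rw [h] <;> decide)]
      simp [hd0mem, hfid]
    rcases (by simpa using hd0digits : d0 = '1' ∨ d0 = '2' ∨ d0 = '3' ∨ d0 = '4') with h|h|h|h <;>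
      rw [h] at hinent <;> simp only [List.mem_append] <;> tauto
  have hne : (ent cs '1' ++ ent cs '2' ++ ent cs '3' ++ ent cs '4') ≠ [] := by
    intro hnil; rw [hnil] at hentmem; simp at hentmem
  refine ⟨hne, ?_⟩
  obtain ⟨m, hmeq⟩ : ∃ m, PySem.List.min? (ent cs '1' ++ ent cs '2' ++ ent cs '3' ++ ent cs '4') (fun x => x) = some m := by
    obtain ⟨x, xs, hlst⟩ := List.exists_cons_of_ne_nil hne
    rw [hlst, PySem.List.min?_id_cons]
    exact ⟨_, rfl⟩
  rw [hmeq]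
  have hmmem := PySem.List.min?_mem hmeq
  have hmle : m ≤ nsb cs J := PySem.List.min?_isMin hmeq _ hentmem
  have hge : nsb cs J ≤ m := by
    rcases mem_ents cs m hmmem with ⟨d, hddig, hdm, hdval⟩
    have hdnote : isNote d = true := by simp [isNote, hddig]
    rw [hdval]
    exact nsb_mono cs (note_findIdx_ge cs d hdnote hdm)
  exact congrArg some (le_antisymm hmle hge)

lemma A_eq (s : String) :
    LeftNonNote s = if s.toList.any isNote then nsb s.toList (s.toList.findIdx isNote) else -1 := by
  have hrange : PySem.List.pyRange 1 5 1 = [1, 2, 3, 4] := by decide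
  unfold LeftNonNote
  rw [hrange]
  simp only [List.foldl]
  rw [step_eq s (PySem.Int.toStr 1) '1' (by decide) (by decide),
      step_eq s (PySem.Int.toStr 2) '2' (by decide) (by decide),
      step_eq s (PySem.Int.toStr 3) '3' (by decide) (by decide),
      step_eq s (PySem.Int.toStr 4) '4' (by decide) (by decide)]
  simp only [List.nil_append]
  by_cases h : s.toList.any isNote = true
  · obtain ⟨hne, hmin⟩ := min_ents s.toList h
    rw [if_pos (by simpa using hne), hmin, if_pos h]
    rfl
  · have h1 : '1' ∉ s.toList := fun hm => h (List.any_eq_true.mpr ⟨'1', hm, by decide⟩)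
    have h2 : '2' ∉ s.toList := fun hm => h (List.any_eq_true.mpr ⟨'2', hm, by decide⟩)
    have h3 : '3' ∉ s.toList := fun hm => h (List.any_eq_true.mpr ⟨'3', hm, by decide⟩)
    have h4 : '4' ∉ s.toList := fun hm => h (List.any_eq_true.mpr ⟨'4', hm, by decide⟩)
    rw [ent_eq _ _ (by decide), ent_eq _ _ (by decide), ent_eq _ _ (by decide), ent_eq _ _ (by decide)]
    simp [h1, h2, h3, h4, h]

-- ===== VERDICT (by name: the statement is the Claim_ definition above) =====
theorem LeftNonNote_spec : Claim_equal_LeftNonNote := by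
  intro s _
  unfold Spec_LeftNonNote LeftNonNote_alt
  rw [A_eq s, altB_eq s.toList 0]
  simp
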